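-- pv_equiv track=rewrite | github.com/camiiutd/algo1_2k24_1C | 2cuatri/python/parciales/dalequeseaprueba/repaso_preparcial.py | creo_matriz
-- ===== SOURCE A (Python) =====
-- def maximo(l):
--     max_actual=l[0]
--     for e in l:
--         if e > max_actual:
--             max_actual=e
--     return max_actual
--
-- def minimo(l):
--     mini=l[0]
--     for i in l:
--         if i < mini:
--             mini=i
--     return mini
--
-- def creo_matriz(l:list[int])->list[list[int]]:
--     matriz=[]
--     maxi=maximo(l)
--     mini=minimo(l)
--
--     n= maxi - mini +1
--
--     for i in range(n):
--         fila=[]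
--         for j in range(n):
--             valor= mini + (i+j) % n
--             fila.append(valor)
--         matriz.append(fila)
--
--     return matriz
-- ===== SOURCE B (Python) =====
-- def creo_matriz(l: list[int]) -> list[list[int]]:
--     maxi = max(l)
--     mini = min(l)
--     n = maxi - mini + 1
--     base = list(range(mini, maxi + 1))
--     return [base[i:] + base[:i] for i in range(n)]
-- ===== Notes on version B (the rewrite author's own statement) =====
-- stated objective: faster
-- what changed: B builds the first row once with range(mini, maxi+1) and produces each row as a slice rotation base[i:]+base[:i], instead of A's nested loop computing mini+(i+j)%n element by element.
import Mathlib
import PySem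

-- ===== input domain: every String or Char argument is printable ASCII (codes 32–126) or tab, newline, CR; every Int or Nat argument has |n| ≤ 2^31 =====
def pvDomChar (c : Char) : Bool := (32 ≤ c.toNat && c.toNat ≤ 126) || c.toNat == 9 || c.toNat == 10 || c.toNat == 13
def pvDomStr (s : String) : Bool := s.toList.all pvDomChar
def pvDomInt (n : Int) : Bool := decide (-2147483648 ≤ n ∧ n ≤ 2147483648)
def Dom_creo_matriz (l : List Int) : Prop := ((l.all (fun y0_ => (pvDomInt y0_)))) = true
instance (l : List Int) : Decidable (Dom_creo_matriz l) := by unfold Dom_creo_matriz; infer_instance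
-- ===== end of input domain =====

-- B replaces A's nested per-cell loop 'mini + (i+j) % n' by one base row and slice rotations; equivalence of return values is proved on nonempty lists (both raise on []).

-- ===== PORT A =====
-- l[0] raises IndexError on []; Pre_ excludes that, headI is a placeholder there
def pvMaximo (l : List Int) : Int :=
  l.foldl (fun max_actual e => if e > max_actual then e else max_actual) l.headI

def pvMinimo (l : List Int) : Int :=
  l.foldl (fun mini i => if i < mini then i else mini) l.headI

def creo_matriz (l : List Int) : List (List Int) :=
  let maxi := pvMaximo l
  let mini := pvMinimo l
  let n := maxi - mini + 1
  (PySem.List.pyRange 0 n 1).foldl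
    (fun matriz i =>
      matriz ++
        [(PySem.List.pyRange 0 n 1).foldl
          (fun fila j => fila ++ [mini + PySem.Int.mod (i + j) n]) []])
    []

-- ===== PORT B =====
-- max(l)/min(l) raise ValueError on []; the none branch is unreachable under Pre_
def creo_matriz_alt (l : List Int) : List (List Int) :=
  match PySem.List.max? l (fun x => x), PySem.List.min? l (fun x => x) with
  | some maxi, some mini =>
      let n := maxi - mini + 1
      let base := PySem.List.pyRange mini (maxi + 1) 1
      (PySem.List.pyRange 0 n 1).map (fun i =>
        PySem.List.slice base (some i) none ++ PySem.List.slice base none (some i))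
  | _, _ => []

-- ===== PRECONDITION & SPEC =====
-- Pre_ excludes only the empty list, on which A raises IndexError (and B raises ValueError)
def Pre_creo_matriz (l : List Int) : Prop := l ≠ []
instance (l : List Int) : Decidable (Pre_creo_matriz l) := by unfold Pre_creo_matriz; infer_instance

def pvWitness_creo_matriz : List Int := [2, 0, 1]

def Spec_creo_matriz (l : List Int) (out : List (List Int)) : Prop := out = creo_matriz_alt l
instance (l : List Int) (out : List (List Int)) : Decidable (Spec_creo_matriz l out) := by unfold Spec_creo_matriz; infer_instance

-- ===== CLAIM (what is proved, stated in full; the proofs are below) =====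
def Claim_equal_creo_matriz : Prop := ∀ (l : List Int), Dom_creo_matriz l → Pre_creo_matriz l → Spec_creo_matriz l (creo_matriz l)

-- ===== LEMMAS AND PROOFS =====

theorem pvMaximo_cons (x : Int) (t : List Int) : pvMaximo (x :: t) = t.foldl max x := by
  unfold pvMaximo
  simp only [List.headI, List.foldl_cons, gt_iff_lt, lt_self_iff_false, if_false]
  exact PySem.List.foldl_congr_mem t _ _ x (by intro m e _; simp [max_def]; split_ifs <;> omega)

theorem pvMinimo_cons (x : Int) (t : List Int) : pvMinimo (x :: t) = t.foldl min x := by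
  unfold pvMinimo
  simp only [List.headI, List.foldl_cons, lt_self_iff_false, if_false]
  exact PySem.List.foldl_congr_mem t _ _ x (by intro m e _; simp [min_def]; split_ifs <;> omega)

-- one row of A equals the corresponding slice rotation of the base row
theorem pv_row_eq (m M i : Int) (hm : m ≤ M) (hi0 : 0 ≤ i) (hin : i < M - m + 1) :
    (PySem.List.pyRange 0 (M - m + 1) 1).map
        (fun j => m + PySem.Int.mod (i + j) (M - m + 1)) =
      PySem.List.slice (PySem.List.pyRange m (M + 1) 1) (some i) none ++
        PySem.List.slice (PySem.List.pyRange m (M + 1) 1) none (some i) := by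
  rw [PySem.List.slice_from _ hi0, PySem.List.slice_to _ hi0]
  have hn : (0 : Int) < M - m + 1 := by omega
  apply List.ext_getElem
  · simp [PySem.List.length_pyRange_one]; omega
  · intro k h1 h2
    have hlen : (PySem.List.pyRange m (M + 1) 1).length = (M - m + 1).toNat := by
      simp [PySem.List.length_pyRange_one]; omega
    have hk : k < (M - m + 1).toNat := by
      simpa [PySem.List.length_pyRange_one] using h1
    rw [List.getElem_map, PySem.List.getElem_pyRange_one,
      PySem.Int.mod_eq_emod_of_pos hn]
    by_cases hcase : k < (M - m + 1).toNat - i.toNat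
    · rw [List.getElem_append_left (by simp [List.length_drop, hlen]; omega),
        List.getElem_drop, PySem.List.getElem_pyRange_one,
        Int.emod_eq_of_lt (by omega) (by omega)]
      omega
    · rw [List.getElem_append_right (by simp [List.length_drop, hlen]; omega)]
      simp only [List.getElem_take, List.length_drop, hlen]
      rw [PySem.List.getElem_pyRange_one,
        show i + (0 + (k : Int)) = (i + (0 + k) - (M - m + 1)) + (M - m + 1) * 1 by ring,
        Int.add_mul_emod_self_left, Int.emod_eq_of_lt (by omega) (by omega)]
      omega

-- ===== VERDICT (by name: the statement is the Claim_ definition above) =====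
theorem creo_matriz_spec : Claim_equal_creo_matriz := by
  intro l _ hpre
  unfold Spec_creo_matriz
  match l with
  | [] => exact absurd rfl hpre
  | x :: t =>
    unfold creo_matriz creo_matriz_alt
    rw [PySem.List.max?_id_cons, PySem.List.min?_id_cons]
    simp only
    rw [pvMaximo_cons, pvMinimo_cons]
    set M := t.foldl max x with hM
    set m := t.foldl min x with hm'
    have hmM : m ≤ M := le_trans (PySem.List.foldl_min_le t x).1 (PySem.List.le_foldl_max t x).1
    rw [PySem.List.foldl_append_singleton_eq_map]
    simp only [List.nil_append]
    apply List.map_congr_left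
    intro i hi
    rw [PySem.List.mem_pyRange_one] at hi
    rw [PySem.List.foldl_append_singleton_eq_map]
    simp only [List.nil_append]
    exact pv_row_eq m M i hmM hi.1 hi.2
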